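-- pv_equiv track=rewrite | github.com/singularityhub/singularity-cli | spython/main/parse/converters.py | write_lines
-- ===== SOURCE A (Python) =====
-- def write_lines(label, lines):
--     '''write a list of lines with a header for a section.
--
--        Parameters
--        ==========
--        lines: one or more lines to write, with header appended
--
--     '''
--     result = []
--     continued = False
--     for line in lines:
--         if continued:
--             result.append(line)
--         else:
--             result.append('%s %s' %(label, line))
--         continued = False
--         if line.endswith('\\'):
--             continued = True
--
--     return result
-- ===== SOURCE B (Python) =====
-- def write_lines(label, lines):
--     '''write a list of lines with a header for a section (record-wise version:
--        consume each logical record — a line plus its backslash continuations —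
--        with an inner loop, prefixing only the record's first line).'''
--     result = []
--     it = iter(lines)
--     for line in it:
--         result.append('%s %s' % (label, line))
--         while line.endswith('\\'):
--             line = next(it, None)
--             if line is None:
--                 break
--             result.append(line)
--     return result
-- ===== Notes on version B (the rewrite author's own statement) =====
-- stated objective: alternative
-- what changed: Replaces A's flat single pass threading a per-line 'continued' boolean with record-wise nested loops: an outer loop takes each record's first line and prefixes it, and an inner loop consumes and emits raw the whole run of backslash continuations.
import Mathlib
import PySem

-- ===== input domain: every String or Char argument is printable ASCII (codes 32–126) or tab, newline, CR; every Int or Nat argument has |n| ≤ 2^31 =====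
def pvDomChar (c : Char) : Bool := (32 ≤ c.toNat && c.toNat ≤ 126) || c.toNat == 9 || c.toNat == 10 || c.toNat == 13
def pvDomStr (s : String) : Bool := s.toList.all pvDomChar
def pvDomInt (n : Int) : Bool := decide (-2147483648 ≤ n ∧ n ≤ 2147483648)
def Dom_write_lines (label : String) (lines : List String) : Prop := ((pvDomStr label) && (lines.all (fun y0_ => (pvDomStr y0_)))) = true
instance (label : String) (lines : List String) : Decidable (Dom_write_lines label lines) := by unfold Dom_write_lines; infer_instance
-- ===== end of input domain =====

-- B replaces A's flat single pass threading a 'continued' boolean by record-wise nested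
-- loops: outer loop prefixes each record's first line, inner loop consumes its backslash
-- continuations (objective: alternative decomposition; same cost).

-- ===== PORT A =====
-- Port of A: single pass over lines threading (result, continued).
def write_lines (label : String) (lines : List String) : List String :=
  (lines.foldl (fun st line =>
      let result := if st.2 then st.1 ++ [line] else st.1 ++ [label ++ " " ++ line]
      (result, PySem.Str.endswith line "\\"))
    (([] : List String), false)).1

-- ===== PORT B =====
-- Inner 'while' of B: consume the run of continuation lines after `prev`;
-- returns (lines emitted raw, remaining iterator contents).
def spanCont (prev : String) (rest : List String) : List String × List String :=
  match rest with
  | [] => ([], [])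
  | x :: xs =>
    if PySem.Str.endswith prev "\\" then
      let p := spanCont x xs
      (x :: p.1, p.2)
    else ([], x :: xs)

theorem spanCont_len (prev : String) (rest : List String) :
    (spanCont prev rest).2.length ≤ rest.length := by
  induction rest generalizing prev with
  | nil => simp [spanCont]
  | cons x xs ih =>
    simp only [spanCont]
    split
    · exact Nat.le_succ_of_le (ih x)
    · simp

-- Outer 'for' of B: each step takes one record's first line (prefixed) plus its
-- continuation run (raw), then recurses on what is left of the iterator.
def write_lines_alt (label : String) (lines : List String) : List String :=
  match lines with
  | [] => []
  | h :: t =>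
    let p := spanCont h t
    (label ++ " " ++ h) :: (p.1 ++ write_lines_alt label p.2)
termination_by lines.length
decreasing_by
  simpa using Nat.lt_succ_of_le (spanCont_len h t)

-- ===== PRECONDITION & SPEC =====
def Spec_write_lines (label : String) (lines : List String) (out : List String) : Prop := out = write_lines_alt label lines
instance (label : String) (lines : List String) (out : List String) : Decidable (Spec_write_lines label lines out) := by unfold Spec_write_lines; infer_instance

-- ===== CLAIM (what is proved, stated in full; the proofs are below) =====
def Claim_equal_write_lines : Prop := ∀ (label : String) (lines : List String), Dom_write_lines label lines → Spec_write_lines label lines (write_lines label lines)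

-- ===== LEMMAS AND PROOFS =====

theorem wl_loop (label : String) (rest : List String) (acc : List String) (prev : String) :
    (rest.foldl (fun st line =>
        let result := if st.2 then st.1 ++ [line] else st.1 ++ [label ++ " " ++ line]
        (result, PySem.Str.endswith line "\\"))
      (acc, PySem.Str.endswith prev "\\")).1
    = acc ++ (spanCont prev rest).1 ++ write_lines_alt label (spanCont prev rest).2 := by
  induction rest generalizing acc prev with
  | nil => simp [spanCont, write_lines_alt]
  | cons x xs ih =>
    by_cases h : PySem.Chars.endswith prev.toList ['\\'] = true
    · show (xs.foldl _ ((if PySem.Str.endswith prev "\\" then acc ++ [x]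
          else acc ++ [label ++ " " ++ x]), PySem.Str.endswith x "\\")).1 = _
      rw [if_pos (show PySem.Str.endswith prev "\\" = true from h), ih (acc ++ [x]) x]
      simp [spanCont, h]
    · show (xs.foldl _ ((if PySem.Str.endswith prev "\\" then acc ++ [x]
          else acc ++ [label ++ " " ++ x]), PySem.Str.endswith x "\\")).1 = _
      rw [if_neg (show ¬ PySem.Str.endswith prev "\\" = true from h),
        ih (acc ++ [label ++ " " ++ x]) x]
      simp [spanCont, h, write_lines_alt]

-- ===== VERDICT (by name: the statement is the Claim_ definition above) =====
theorem write_lines_spec : Claim_equal_write_lines := by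
  intro label lines _
  unfold Spec_write_lines write_lines
  have hfalse : PySem.Str.endswith "" "\\" = false := by decide
  rw [← hfalse, wl_loop]
  cases lines with
  | nil => simp [spanCont, write_lines_alt]
  | cons h t =>
    rw [show spanCont "" (h :: t) = ([], h :: t) from rfl]
    simp
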